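-- pv_equiv track=rewrite | github.com/aeau/aiide-papers-analysis | src/ExperimenterFDG.py | find_sections_with_names
-- ===== SOURCE A (Python) =====
-- def find_sections_with_names(text_data, known_sections):
--     matches = []
--
--     for known_section in known_sections:
--         known_section_strip = known_section.replace("\n", " ")
--         known_section_strip = " ".join(known_section.split())
--         for index, text in enumerate(text_data):
--             aux_text = text.replace("\n", " ")
--             aux_text = " ".join(text.split())
--             if aux_text.startswith(known_section_strip):
--                 matches.append((index, text))
--                 break
--             # elif ## todo: What I am trying to do here is when the text includes the section name (but it does not start with it!...)
--
--     return matches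
-- ===== SOURCE B (Python) =====
-- def find_sections_with_names(text_data, known_sections):
--     # One forward pass over text_data builds a first-match table keyed by
--     # normalized section; emission is then lookup-driven in known_sections order.
--     norm_secs = [" ".join(s.split()) for s in known_sections]
--     pending = list(dict.fromkeys(norm_secs))
--     first = {}
--     for index, text in enumerate(text_data):
--         if not pending:
--             break
--         nt = " ".join(text.split())
--         still = []
--         for s in pending:
--             if nt.startswith(s):
--                 first[s] = (index, text)
--             else:
--                 still.append(s)
--         pending = still
--     return [first[s] for s in norm_secs if s in first]
-- ===== Notes on version B (the rewrite author's own statement) =====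
-- stated objective: faster
-- what changed: A rescans text_data from the start for every section; B makes one forward pass over text_data (normalizing each text once) that builds a first-match table keyed by normalized section, with early exit once all distinct sections are matched, and then emits lookup-driven in known_sections order.
import Mathlib
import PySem

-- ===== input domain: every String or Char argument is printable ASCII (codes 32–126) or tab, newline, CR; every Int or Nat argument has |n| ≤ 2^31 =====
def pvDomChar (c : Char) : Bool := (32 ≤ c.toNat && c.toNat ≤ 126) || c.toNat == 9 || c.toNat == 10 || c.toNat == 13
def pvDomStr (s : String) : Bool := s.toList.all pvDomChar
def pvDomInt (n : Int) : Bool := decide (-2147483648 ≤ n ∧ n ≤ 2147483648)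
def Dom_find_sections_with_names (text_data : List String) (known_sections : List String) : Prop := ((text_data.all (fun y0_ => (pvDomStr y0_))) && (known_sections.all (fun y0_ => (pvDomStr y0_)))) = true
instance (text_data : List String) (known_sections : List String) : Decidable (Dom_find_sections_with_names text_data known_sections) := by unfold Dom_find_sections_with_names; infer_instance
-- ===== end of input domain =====

-- B replaces A's per-section rescan of text_data by one forward pass building a
-- first-match table keyed by normalized section, then lookup-driven emission (measured faster in a timing run).

-- " ".join(x.split()) — the normalization both Pythons apply
def pvNorm (s : String) : String := PySem.Str.join " " (PySem.Str.split₀ s)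

-- ===== PORT A =====
-- inner 'for index, text in enumerate(text_data): … break'
def pvScanA : List (Int × String) → String → List (Int × String)
  | [], _ => []
  | (index, text) :: rest, k =>
      let aux_text := PySem.Str.replace text "\n" " "
      let aux_text := pvNorm text
      if PySem.Str.startswith aux_text k then [(index, text)] else pvScanA rest k

def find_sections_with_names (text_data : List String) (known_sections : List String) : List (Int × String) :=
  known_sections.foldl (fun ms known_section =>
    let known_section_strip := PySem.Str.replace known_section "\n" " "
    let known_section_strip := pvNorm known_section
    ms ++ pvScanA (PySem.List.enumerate text_data) known_section_strip) []

-- ===== PORT B =====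
-- body of 'for index, text in enumerate(text_data)': one pass over pending building (still, first)
def pvStepB (index : Int) (text : String) (pending : List String)
    (first : PySem.Dict String (Int × String)) : List String × PySem.Dict String (Int × String) :=
  let nt := pvNorm text
  pending.foldl
    (fun acc s =>
      if PySem.Str.startswith nt s then (acc.1, acc.2.insert s (index, text))
      else (acc.1 ++ [s], acc.2))
    ([], first)

def pvLoopB : List (Int × String) → List String → PySem.Dict String (Int × String) → PySem.Dict String (Int × String)
  | [], _, first => first
  | (index, text) :: rest, pending, first =>
      if pending.isEmpty then first
      else
        let st := pvStepB index text pending first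
        pvLoopB rest st.1 st.2

def find_sections_with_names_alt (text_data : List String) (known_sections : List String) : List (Int × String) :=
  let norm_secs := known_sections.map pvNorm
  let first := pvLoopB (PySem.List.enumerate text_data) (PySem.List.dedup norm_secs) PySem.Dict.empty
  norm_secs.filterMap (fun s => first.get? s)

-- ===== PRECONDITION & SPEC =====
def Spec_find_sections_with_names (text_data : List String) (known_sections : List String) (out : List (Int × String)) : Prop := out = find_sections_with_names_alt text_data known_sections
instance (text_data : List String) (known_sections : List String) (out : List (Int × String)) : Decidable (Spec_find_sections_with_names text_data known_sections out) := by unfold Spec_find_sections_with_names; infer_instance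

-- ===== CLAIM (what is proved, stated in full; the proofs are below) =====
def Claim_equal_find_sections_with_names : Prop := ∀ (text_data : List String) (known_sections : List String), Dom_find_sections_with_names text_data known_sections → Spec_find_sections_with_names text_data known_sections (find_sections_with_names text_data known_sections)

-- ===== LEMMAS AND PROOFS =====

-- characterization of the inner fold of B's loop body (generalized accumulator)
theorem pvStepB_fold (index : Int) (text : String) (nt : String) :
    ∀ (pending : List String) (a : List String) (d : PySem.Dict String (Int × String)),
      (pending.foldl
        (fun acc s =>
          if PySem.Str.startswith nt s then (acc.1, acc.2.insert s (index, text))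
          else (acc.1 ++ [s], acc.2)) (a, d)).1
        = a ++ pending.filter (fun s => !PySem.Str.startswith nt s)
      ∧ ∀ s, (pending.foldl
        (fun acc s =>
          if PySem.Str.startswith nt s then (acc.1, acc.2.insert s (index, text))
          else (acc.1 ++ [s], acc.2)) (a, d)).2.get? s
        = if s ∈ pending ∧ PySem.Str.startswith nt s then some (index, text) else d.get? s := by
  intro pending
  induction pending with
  | nil =>
    intro a d
    exact ⟨by simp, by intro s; simp⟩
  | cons s0 rest ih =>
    intro a d
    by_cases h0 : PySem.Str.startswith nt s0 = true
    · simp only [List.foldl_cons, h0, if_true]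
      constructor
      · rw [(ih a (d.insert s0 (index, text))).1, List.filter_cons, h0]
        simp only [Bool.not_true, Bool.false_eq_true, if_false]
      · intro s
        rw [(ih a (d.insert s0 (index, text))).2 s]
        by_cases hm : s ∈ rest ∧ PySem.Str.startswith nt s = true
        · rw [if_pos hm, if_pos ⟨List.mem_cons_of_mem _ hm.1, hm.2⟩]
        · rw [if_neg hm]
          by_cases he : s = s0
          · subst he
            rw [PySem.Dict.get?_insert_self, if_pos ⟨List.mem_cons_self, h0⟩]
          · rw [PySem.Dict.get?_insert_of_ne d _ he]
            rw [if_neg (by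
              rintro ⟨hmem, hsw⟩
              rcases List.mem_cons.mp hmem with h | h
              · exact he h
              · exact hm ⟨h, hsw⟩)]
    · simp only [List.foldl_cons, h0, if_false, Bool.false_eq_true]
      constructor
      · rw [(ih (a ++ [s0]) d).1, List.filter_cons]
        have : (!PySem.Str.startswith nt s0) = true := by
          simp only [Bool.not_eq_eq_eq_not, Bool.not_true]
          exact Bool.of_not_eq_true h0
        rw [this, if_pos rfl, List.append_assoc, List.singleton_append]
      · intro s
        rw [(ih (a ++ [s0]) d).2 s]
        by_cases hm : s ∈ rest ∧ PySem.Str.startswith nt s = true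
        · rw [if_pos hm, if_pos ⟨List.mem_cons_of_mem _ hm.1, hm.2⟩]
        · rw [if_neg hm]
          rw [if_neg (by
            rintro ⟨hmem, hsw⟩
            rcases List.mem_cons.mp hmem with h | h
            · subst h; exact h0 hsw
            · exact hm ⟨h, hsw⟩)]

theorem pvStepB_fst (index : Int) (text : String) (pending : List String)
    (first : PySem.Dict String (Int × String)) :
    (pvStepB index text pending first).1
      = pending.filter (fun s => !PySem.Str.startswith (pvNorm text) s) := by
  have := (pvStepB_fold index text (pvNorm text) pending [] first).1
  simpa [pvStepB] using this

theorem pvStepB_snd_get? (index : Int) (text : String) (pending : List String)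
    (first : PySem.Dict String (Int × String)) (s : String) :
    (pvStepB index text pending first).2.get? s
      = if s ∈ pending ∧ PySem.Str.startswith (pvNorm text) s then some (index, text)
        else first.get? s := by
  have := (pvStepB_fold index text (pvNorm text) pending [] first).2 s
  simpa [pvStepB] using this

-- the main invariant: the table built by B's loop agrees with A's inner scan
theorem pvLoopB_get? (l : List (Int × String)) (pending : List String)
    (first : PySem.Dict String (Int × String))
    (hinv : ∀ s ∈ pending, first.get? s = none) (s : String) :
    (pvLoopB l pending first).get? s
      = if s ∈ pending then (pvScanA l s).head? else first.get? s := by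
  induction l generalizing pending first with
  | nil =>
    simp only [pvLoopB, pvScanA]
    by_cases hm : s ∈ pending
    · rw [if_pos hm, hinv s hm]; rfl
    · rw [if_neg hm]
  | cons p rest ih =>
    obtain ⟨index, text⟩ := p
    by_cases hemp : pending.isEmpty
    · have : pending = [] := List.isEmpty_iff.mp hemp
      subst this
      simp [pvLoopB]
    · rw [show pvLoopB ((index, text) :: rest) pending first
          = pvLoopB rest (pvStepB index text pending first).1 (pvStepB index text pending first).2 by
        simp [pvLoopB, hemp]]
      have hinv' : ∀ t ∈ (pvStepB index text pending first).1,
          (pvStepB index text pending first).2.get? t = none := by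
        intro t ht
        rw [pvStepB_fst] at ht
        have hmem := List.mem_of_mem_filter ht
        have hsw := List.of_mem_filter ht
        simp only [Bool.not_eq_eq_eq_not, Bool.not_true] at hsw
        rw [pvStepB_snd_get?]
        rw [if_neg (by rintro ⟨_, h2⟩; rw [hsw] at h2; exact Bool.false_ne_true h2)]
        exact hinv t hmem
      rw [ih _ _ hinv']
      by_cases hm : s ∈ pending
      · by_cases hsw : PySem.Str.startswith (pvNorm text) s = true
        · have hsw' : PySem.Chars.startswith (pvNorm text).toList s.toList = true := by
            simpa using hsw
          have hnm : s ∉ (pvStepB index text pending first).1 := by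
            rw [pvStepB_fst]
            intro hc
            have h2 := List.of_mem_filter hc
            simp only [Bool.not_eq_eq_eq_not, Bool.not_true, PySem.Str.startswith_eq] at h2
            exact absurd (hsw'.symm.trans h2) (by decide)
          rw [if_neg hnm, pvStepB_snd_get?, if_pos ⟨hm, hsw⟩, if_pos hm]
          simp [pvScanA, hsw']
        · have hsw' : PySem.Chars.startswith (pvNorm text).toList s.toList = false := by
            simpa using hsw
          have hmm : s ∈ (pvStepB index text pending first).1 := by
            rw [pvStepB_fst]
            exact List.mem_filter.mpr ⟨hm, by simp [hsw']⟩
          rw [if_pos hmm, if_pos hm]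
          simp [pvScanA, hsw']
      · have hnm : s ∉ (pvStepB index text pending first).1 := by
          rw [pvStepB_fst]
          intro hc
          exact hm (List.mem_of_mem_filter hc)
        rw [if_neg hnm, if_neg hm, pvStepB_snd_get?,
          if_neg (by rintro ⟨h1, _⟩; exact hm h1)]

-- A's inner scan returns [] or a singleton: it is its own head?
theorem pvScanA_eq_head_toList (l : List (Int × String)) (k : String) :
    pvScanA l k = (pvScanA l k).head?.toList := by
  induction l with
  | nil => rfl
  | cons p rest ih =>
    obtain ⟨index, text⟩ := p
    simp only [pvScanA]
    by_cases h : PySem.Chars.startswith (pvNorm text).toList k.toList = true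
    · simp [h]
    · simp only [PySem.Str.startswith_eq, h, Bool.false_eq_true, if_false]
      exact ih

-- A's outer fold is a flatMap
theorem pvFoldA (E : List (Int × String)) :
    ∀ (ks : List String) (acc : List (Int × String)),
      ks.foldl (fun ms known_section =>
        let known_section_strip := PySem.Str.replace known_section "\n" " "
        let known_section_strip := pvNorm known_section
        ms ++ pvScanA E known_section_strip) acc
      = acc ++ ks.flatMap (fun k => pvScanA E (pvNorm k)) := by
  intro ks
  induction ks with
  | nil => intro acc; simp
  | cons k rest ih => intro acc; simp only [List.foldl_cons, List.flatMap_cons]; rw [ih]; simp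

-- ===== VERDICT (by name: the statement is the Claim_ definition above) =====
-- flatMap of a []-or-singleton function is the filterMap of its head?
theorem pvFlatEq (E : List (Int × String)) (ks : List String) :
    ks.flatMap (fun k => pvScanA E (pvNorm k))
      = ks.filterMap (fun k => (pvScanA E (pvNorm k)).head?) := by
  induction ks with
  | nil => rfl
  | cons k rest ih =>
    rw [List.flatMap_cons, List.filterMap_cons]
    have h1 := pvScanA_eq_head_toList E (pvNorm k)
    cases ho : (pvScanA E (pvNorm k)).head? with
    | none => rw [h1, ho]; simpa using ih
    | some v => rw [h1, ho]; simp [ih]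

theorem find_sections_with_names_spec : Claim_equal_find_sections_with_names := by
  unfold Claim_equal_find_sections_with_names
  intro td ks _
  unfold Spec_find_sections_with_names find_sections_with_names find_sections_with_names_alt
  rw [pvFoldA]
  have htab : ∀ s ∈ ks.map pvNorm,
      (pvLoopB (PySem.List.enumerate td) (PySem.List.dedup (ks.map pvNorm)) PySem.Dict.empty).get? s
        = (pvScanA (PySem.List.enumerate td) s).head? := by
    intro s hs
    rw [pvLoopB_get? _ _ _ (by intro t _; rfl) s,
      if_pos ((PySem.List.mem_dedup _ _).mpr hs)]
  rw [List.filterMap_congr htab, List.filterMap_map, List.nil_append]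
  simp only [Function.comp_def]
  exact pvFlatEq _ _
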